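-- pv_equiv track=rewrite | github.com/yanndanielou/yanndan-programmation | Python/ShutTheBox/src/closethebox/application.py | get_all_unique_combinaisons_to_reach_exaclty_sum_using_element_no_more_than_once
-- ===== SOURCE A (Python) =====
-- def get_all_unique_combinaisons_to_reach_exaclty_sum_using_element_no_more_than_once(
--                                                                                        elements:list[int],
--                                                                                        sum_to_attain:int)->list[list[int]]:
--
--     def backtrack(reste:int, index:int, chemin:list)->None:
--         # Si la somme restante est atteinte, ajouter la combinaison
--         if reste == 0:
--             results.append(list(chemin))
--             return
--         # Si la somme restante est négative ou plus d'éléments, arrêter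
--         if reste < 0:
--             return
--
--         for i in range(index, len(elements)):
--             # Ajouter le nombre actuel au chemin
--             chemin.append(elements[i])
--             # Appel récursif avec la somme restante mise à jour et index + 1 (pour éviter les répétitions)
--             backtrack(reste - elements[i], i+1, chemin)  # Réutiliser l'élément actuel (index = i)
--             # Retirer l'élément ajouté (backtracking)
--             chemin.pop()
--
--
--     results:list[list[int]] = list()
--
--     backtrack(sum_to_attain, 0, [])
--
--     return results
-- ===== SOURCE B (Python) =====
-- def get_all_unique_combinaisons_to_reach_exaclty_sum_using_element_no_more_than_once(
--                                                                                        elements:list[int],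
--                                                                                        sum_to_attain:int)->list[list[int]]:
--     # Pure value-returning recursion: solve(reste, index) returns the list of suffix
--     # combinations drawn from elements[index:], built by prepending the included
--     # element to each recursive tail; no mutable path or results accumulator.
--     def solve(reste: int, index: int) -> list[list[int]]:
--         if reste == 0:
--             return [[]]
--         if reste < 0 or index == len(elements):
--             return []
--         first = elements[index]
--         with_it = [[first] + tail for tail in solve(reste - first, index + 1)]
--         return with_it + solve(reste, index + 1)
--
--     return solve(sum_to_attain, 0)
-- ===== Notes on version B (the rewrite author's own statement) =====
-- stated objective: alternative
-- what changed: Replaced A's mutable backtracking (shared results list, append/pop on a chemin path) with a pure value-returning recursion that computes the list of suffix combinations and prepends the chosen element to each recursive tail, concatenating include and exclude branches.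
import Mathlib
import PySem

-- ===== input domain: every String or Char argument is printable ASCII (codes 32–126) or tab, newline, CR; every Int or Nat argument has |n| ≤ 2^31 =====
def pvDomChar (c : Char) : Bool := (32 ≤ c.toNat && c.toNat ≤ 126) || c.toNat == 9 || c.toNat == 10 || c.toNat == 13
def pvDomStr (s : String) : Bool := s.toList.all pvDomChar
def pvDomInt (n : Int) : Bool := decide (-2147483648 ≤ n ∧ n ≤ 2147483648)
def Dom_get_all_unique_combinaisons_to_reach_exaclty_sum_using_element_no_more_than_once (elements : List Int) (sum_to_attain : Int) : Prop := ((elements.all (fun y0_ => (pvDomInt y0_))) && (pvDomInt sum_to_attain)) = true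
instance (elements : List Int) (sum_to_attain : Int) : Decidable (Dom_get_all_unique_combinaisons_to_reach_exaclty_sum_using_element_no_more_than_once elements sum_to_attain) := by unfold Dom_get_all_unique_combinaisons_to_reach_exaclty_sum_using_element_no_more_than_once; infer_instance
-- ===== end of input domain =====

-- B replaces A's mutable accumulator backtracking with a pure value-returning recursion
-- (suffix combinations built by prepending); objective: alternative decomposition, same cost.

-- ===== PORT A =====
-- A's inner `backtrack` (recursion + for-loop over range(index, len)); `res` is the growing
-- `results` accumulator, `chemin` the current path (append = `++ [e]`, pop = done by passing
-- the unextended `chemin` to the loop continuation).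
-- Fuel (2*len+2 bounds the call depth) is only a totality guard; the fuel-0 branch is unreachable.
mutual
def pyBacktrackA (elements : List Int) : Nat → Int → Nat → List Int → List (List Int) → List (List Int)
  | 0, _, _, _, res => res
  | fuel+1, reste, index, chemin, res =>
    if reste = 0 then res ++ [chemin]
    else if reste < 0 then res
    else pyLoopA elements fuel reste index chemin res

def pyLoopA (elements : List Int) : Nat → Int → Nat → List Int → List (List Int) → List (List Int)
  | 0, _, _, _, res => res
  | fuel+1, reste, j, chemin, res =>
    if h : j < elements.length then
      pyLoopA elements fuel reste (j+1) chemin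
        (pyBacktrackA elements fuel (reste - elements[j]) (j+1) (chemin ++ [elements[j]]) res)
    else res
end

def get_all_unique_combinaisons_to_reach_exaclty_sum_using_element_no_more_than_once (elements : List Int) (sum_to_attain : Int) : List (List Int) :=
  pyBacktrackA elements (2 * elements.length + 2) sum_to_attain 0 [] []

-- ===== PORT B =====
-- B's pure `solve`: returns the list of suffix combinations from elements[index:];
-- the list comprehension `[[first] + tail for tail in …]` is `.map (first :: ·)`.
def solveB (elements : List Int) (reste : Int) (index : Nat) : List (List Int) :=
  if reste = 0 then [[]]
  else if reste < 0 then []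
  else if h : index < elements.length then
    (solveB elements (reste - elements[index]) (index+1)).map (fun tail => elements[index] :: tail)
      ++ solveB elements reste (index+1)
  else []
  termination_by elements.length - index

def get_all_unique_combinaisons_to_reach_exaclty_sum_using_element_no_more_than_once_alt (elements : List Int) (sum_to_attain : Int) : List (List Int) :=
  solveB elements sum_to_attain 0

-- ===== PRECONDITION & SPEC =====
def Spec_get_all_unique_combinaisons_to_reach_exaclty_sum_using_element_no_more_than_once (elements : List Int) (sum_to_attain : Int) (out : List (List Int)) : Prop := out = get_all_unique_combinaisons_to_reach_exaclty_sum_using_element_no_more_than_once_alt elements sum_to_attain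
instance (elements : List Int) (sum_to_attain : Int) (out : List (List Int)) : Decidable (Spec_get_all_unique_combinaisons_to_reach_exaclty_sum_using_element_no_more_than_once elements sum_to_attain out) := by unfold Spec_get_all_unique_combinaisons_to_reach_exaclty_sum_using_element_no_more_than_once; infer_instance

-- ===== CLAIM (what is proved, stated in full; the proofs are below) =====
def Claim_equal_get_all_unique_combinaisons_to_reach_exaclty_sum_using_element_no_more_than_once : Prop := ∀ (elements : List Int) (sum_to_attain : Int), Dom_get_all_unique_combinaisons_to_reach_exaclty_sum_using_element_no_more_than_once elements sum_to_attain → Spec_get_all_unique_combinaisons_to_reach_exaclty_sum_using_element_no_more_than_once elements sum_to_attain (get_all_unique_combinaisons_to_reach_exaclty_sum_using_element_no_more_than_once elements sum_to_attain)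

-- ===== LEMMAS AND PROOFS =====

-- Invariant: A's backtrack appends exactly `chemin ++ t` for each suffix combination t of B's
-- pure solve; proved by fuel induction, the loop claim first (it uses the IH), then backtrack.
lemma ab_eq (elements : List Int) :
    ∀ (fuel : Nat),
      (∀ (j : Nat) (reste : Int) (chemin : List Int) (res : List (List Int)),
        2 * (elements.length - j) + 1 ≤ fuel → reste ≠ 0 → ¬ reste < 0 →
        pyLoopA elements fuel reste j chemin res
          = res ++ (solveB elements reste j).map (fun t => chemin ++ t)) ∧
      (∀ (j : Nat) (reste : Int) (chemin : List Int) (res : List (List Int)),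
        2 * (elements.length - j) + 2 ≤ fuel →
        pyBacktrackA elements fuel reste j chemin res
          = res ++ (solveB elements reste j).map (fun t => chemin ++ t)) := by
  intro fuel
  induction fuel with
  | zero => exact ⟨fun j _ _ _ h => by omega, fun j _ _ _ h => by omega⟩
  | succ fuel ih =>
    have loopStep : ∀ (j : Nat) (reste : Int) (chemin : List Int) (res : List (List Int)),
        2 * (elements.length - j) + 1 ≤ fuel + 1 → reste ≠ 0 → ¬ reste < 0 →
        pyLoopA elements (fuel+1) reste j chemin res
          = res ++ (solveB elements reste j).map (fun t => chemin ++ t) := by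
      intro j reste chemin res hk h0 hneg
      rw [pyLoopA, solveB]
      by_cases hj : j < elements.length
      · simp only [hj, dif_pos, h0, hneg, if_false]
        rw [ih.2 (j+1) (reste - elements[j]) (chemin ++ [elements[j]]) res (by omega)]
        rw [ih.1 (j+1) reste chemin _ (by omega) h0 hneg]
        simp [List.map_map, Function.comp]
      · simp [hj, h0, hneg]
    refine ⟨loopStep, ?_⟩
    intro j reste chemin res hk
    rw [pyBacktrackA]
    by_cases h0 : reste = 0
    · rw [solveB]; simp [h0]
    · by_cases hneg : reste < 0
      · rw [solveB]; simp [h0, hneg]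
      · simp only [h0, hneg, if_false]
        exact ih.1 j reste chemin res (by omega) h0 hneg

-- ===== VERDICT (by name: the statement is the Claim_ definition above) =====
theorem get_all_unique_combinaisons_to_reach_exaclty_sum_using_element_no_more_than_once_spec : Claim_equal_get_all_unique_combinaisons_to_reach_exaclty_sum_using_element_no_more_than_once := by
  intro elements sum_to_attain _
  unfold Spec_get_all_unique_combinaisons_to_reach_exaclty_sum_using_element_no_more_than_once
  unfold get_all_unique_combinaisons_to_reach_exaclty_sum_using_element_no_more_than_once
  unfold get_all_unique_combinaisons_to_reach_exaclty_sum_using_element_no_more_than_once_alt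
  rw [(ab_eq elements (2 * elements.length + 2)).2 0 sum_to_attain [] [] (by omega)]
  simp
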